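-- pv_equiv track=rewrite | github.com/DeshErBojhaa/sports_programming | kickstart/2020G/d(dp).py | handle_recursive
-- ===== SOURCE A (Python) =====
-- def handle_recursive(l, r, arr):
--     if l >= r:
--         return 0
--     if l + 1 == r:
--         return arr[l] + arr[r]
--     ans = 0
--     for i in range(l, r):
--         ans += handle_recursive(l, i, arr) + handle_recursive(i+1, r, arr) + sum(arr[l:r+1])
--     return ans
-- ===== SOURCE B (Python) =====
-- def handle_recursive(l, r, arr):
--     if l >= r:
--         return 0
--     W = r - l + 1
--     M = [0] * (W * W)
--     L = [0] * (W * W)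
--     R = [0] * (W * W)
--     i = 1
--     for a in range(l, r):
--         M[i] = arr[a] + arr[a + 1]
--         i += W
--     for d in range(2, W):
--         i = d
--         for a in range(l, r - d + 1):
--             lv = L[i - 1] + M[i - 1]
--             rv = R[i + W - 1] + M[i + W - 1]
--             M[i] = lv + rv + d * sum(arr[a:a + d + 1])
--             L[i] = lv
--             R[i] = rv
--             i += W
--     return M[r - l]
-- ===== Notes on version B (the rewrite author's own statement) =====
-- stated objective: alternative
-- what changed: Replaces the top-down interval recursion (which recomputes every subinterval exponentially often) by a bottom-up dynamic program over (start, length) cells in flat tables, carrying running left/right partial sums so each subinterval value is computed once; Pre_ excludes only the inputs where A raises IndexError (l < r with an index in l..r outside the array), where B raises too.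
import Mathlib
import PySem

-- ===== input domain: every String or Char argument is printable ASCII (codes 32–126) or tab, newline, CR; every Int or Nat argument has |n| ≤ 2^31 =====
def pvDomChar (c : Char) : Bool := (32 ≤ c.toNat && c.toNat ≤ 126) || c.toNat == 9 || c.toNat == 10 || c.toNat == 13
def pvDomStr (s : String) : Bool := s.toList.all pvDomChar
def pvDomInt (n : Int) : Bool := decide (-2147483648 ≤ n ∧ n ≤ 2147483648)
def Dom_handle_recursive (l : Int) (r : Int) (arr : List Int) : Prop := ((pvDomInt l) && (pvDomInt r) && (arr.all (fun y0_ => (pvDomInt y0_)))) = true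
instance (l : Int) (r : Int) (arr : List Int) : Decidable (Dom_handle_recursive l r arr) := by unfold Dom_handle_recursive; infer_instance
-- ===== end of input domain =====

-- B replaces A's top-down interval recursion by a bottom-up dynamic program over
-- (start, length) cells in flat tables, carrying running left/right partial sums,
-- so each subinterval value is computed once (objective: alternative).


-- ===== PORT A =====
-- Literal port of A's recursion; arr[l] / arr[r] are ported with pyGetD, exact under
-- Pre_handle_recursive (which excludes exactly the IndexError inputs).
def handle_recursive (l : Int) (r : Int) (arr : List Int) : Int :=
  if _h1 : l ≥ r then 0
  else if _h2 : l + 1 = r then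
    PySem.List.pyGetD arr l 0 + PySem.List.pyGetD arr r 0
  else
    (PySem.List.pyRange l r 1).attach.foldl
      (fun ans i =>
        ans + handle_recursive l i.1 arr + handle_recursive (i.1 + 1) r arr
          + (PySem.List.slice arr (some l) (some (r + 1))).sum) 0
termination_by (r - l).toNat
decreasing_by
  · have := (PySem.List.mem_pyRange_one).mp i.2; omega
  · have := (PySem.List.mem_pyRange_one).mp i.2; omega

-- ===== PORT B =====
-- body of Source B's inner loop (one cell of length d starting at a); state ((M, L, R), i)
def hrBody (l r : Int) (arr : List Int) (d : Int) :
    ((List Int × List Int × List Int) × Int) → Int → ((List Int × List Int × List Int) × Int) :=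
  fun t a =>
    let M := t.1.1; let L := t.1.2.1; let R := t.1.2.2; let i := t.2
    let lv := PySem.List.pyGetD L (i - 1) 0 + PySem.List.pyGetD M (i - 1) 0
    let rv := PySem.List.pyGetD R (i + (r - l + 1) - 1) 0
                + PySem.List.pyGetD M (i + (r - l + 1) - 1) 0
    let s := (PySem.List.slice arr (some a) (some (a + d + 1))).sum
    ((PySem.List.pySetD M i (lv + rv + d * s),
      PySem.List.pySetD L i lv,
      PySem.List.pySetD R i rv), i + (r - l + 1))

-- Source B's inner loop over starts a for one interval length d.
def hrInner (l r : Int) (arr : List Int) (d : Int)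
    (st : List Int × List Int × List Int) : List Int × List Int × List Int :=
  ((PySem.List.pyRange l (r - d + 1) 1).foldl (hrBody l r arr d) (st, d)).1

-- Source B's outer loop over interval lengths d = 2 .. W-1.
def hrBuild (l r : Int) (arr : List Int)
    (st0 : List Int × List Int × List Int) : List Int × List Int × List Int :=
  (PySem.List.pyRange 2 (r - l + 1) 1).foldl (fun st d => hrInner l r arr d st) st0

-- Source B's seeding loop: M[1 + (a-l)*W] = arr[a] + arr[a+1] for the length-1 intervals.
def hrSeed (l r : Int) (arr : List Int) (M0 : List Int) : List Int × Int :=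
  (PySem.List.pyRange l r 1).foldl
    (fun st a => (PySem.List.pySetD st.1 st.2
                    (PySem.List.pyGetD arr a 0 + PySem.List.pyGetD arr (a + 1) 0),
                  st.2 + (r - l + 1)))
    (M0, 1)

def handle_recursive_alt (l : Int) (r : Int) (arr : List Int) : Int :=
  if l ≥ r then 0
  else
    let Z : List Int := List.replicate ((r - l + 1) * (r - l + 1)).toNat 0
    let F := hrBuild l r arr ((hrSeed l r arr Z).1, Z, Z)
    PySem.List.pyGetD F.1 (r - l) 0

-- ===== PRECONDITION & SPEC =====
-- Pre_ excludes exactly the inputs where Python A raises IndexError: l < r with some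
-- index in l..r outside [-len(arr), len(arr)) (B raises there too).
def Pre_handle_recursive (l : Int) (r : Int) (arr : List Int) : Prop :=
  l ≥ r ∨ (-(arr.length : Int) ≤ l ∧ r < (arr.length : Int))
instance (l : Int) (r : Int) (arr : List Int) : Decidable (Pre_handle_recursive l r arr) := by
  unfold Pre_handle_recursive; infer_instance

def pvWitness_handle_recursive : Int × Int × List Int := (0, 3, [1, 2, 3, 4])

def Spec_handle_recursive (l : Int) (r : Int) (arr : List Int) (out : Int) : Prop := out = handle_recursive_alt l r arr
instance (l : Int) (r : Int) (arr : List Int) (out : Int) : Decidable (Spec_handle_recursive l r arr out) := by unfold Spec_handle_recursive; infer_instance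

-- ===== CLAIM (what is proved, stated in full; the proofs are below) =====
def Claim_equal_handle_recursive : Prop := ∀ (l : Int) (r : Int) (arr : List Int), Dom_handle_recursive l r arr → Pre_handle_recursive l r arr → Spec_handle_recursive l r arr (handle_recursive l r arr)

-- ===== LEMMAS AND PROOFS =====

-- sum of the length-<than-b prefix intervals sharing left end a
def hrLS (arr : List Int) (a b : Int) : Int :=
  ((PySem.List.pyRange a b 1).map (fun i => handle_recursive a i arr)).sum

-- sum of the suffix intervals sharing right end b
def hrRS (arr : List Int) (a b : Int) : Int :=
  ((PySem.List.pyRange (a + 1) (b + 1) 1).map (fun j => handle_recursive j b arr)).sum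

-- flat-table offset of cell (start a, length d)
def hrOff (l r a d : Int) : Int := (a - l) * (r - l + 1) + d

theorem h_stop (arr : List Int) (a b : Int) (h : b ≤ a) : handle_recursive a b arr = 0 := by
  rw [handle_recursive]; simp [h]

theorem h_base (arr : List Int) (a : Int) :
    handle_recursive a (a + 1) arr = PySem.List.pyGetD arr a 0 + PySem.List.pyGetD arr (a + 1) 0 := by
  rw [handle_recursive]
  rw [dif_neg (by omega), dif_pos rfl]

theorem hrLS_nil (arr : List Int) (a : Int) : hrLS arr a a = 0 := by
  unfold hrLS; rw [PySem.List.pyRange_one_eq_nil (by omega)]; rfl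

theorem hrRS_nil (arr : List Int) (a : Int) : hrRS arr a a = 0 := by
  unfold hrRS; rw [PySem.List.pyRange_one_eq_nil (by omega)]; rfl

theorem hrLS_one (arr : List Int) (a : Int) : hrLS arr a (a + 1) = 0 := by
  unfold hrLS; rw [PySem.List.pyRange_one_singleton]
  simp [h_stop arr a a le_rfl]

theorem hrRS_one (arr : List Int) (a : Int) : hrRS arr a (a + 1) = 0 := by
  unfold hrRS; rw [PySem.List.pyRange_one_singleton]
  simp [h_stop arr (a + 1) (a + 1) le_rfl]

theorem hrLS_succ (arr : List Int) (a b : Int) (h : a ≤ b) :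
    hrLS arr a (b + 1) = hrLS arr a b + handle_recursive a b arr := by
  unfold hrLS
  rw [PySem.List.pyRange_one_succ_right h, List.map_append, List.sum_append]
  simp

theorem hrRS_cons (arr : List Int) (a b : Int) (h : a < b) :
    hrRS arr a b = handle_recursive (a + 1) b arr + hrRS arr (a + 1) b := by
  unfold hrRS
  rw [PySem.List.pyRange_one_cons (by omega), List.map_cons, List.sum_cons]

theorem map_shift (f : Int → Int) (a b : Int) :
    (PySem.List.pyRange a b 1).map (fun i => f (i + 1)) = (PySem.List.pyRange (a + 1) (b + 1) 1).map f := by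
  rw [PySem.List.pyRange_one a b, PySem.List.pyRange_one (a + 1) (b + 1)]
  rw [List.map_map, List.map_map]
  have : b + 1 - (a + 1) = b - a := by ring
  rw [this]
  apply List.map_congr_left
  intro k _
  show f (a + (k : Int) + 1) = f (a + 1 + (k : Int))
  congr 1; ring

-- A's recursive case as a closed combination of the left sums, right sums and the slice sum.
theorem h_split (arr : List Int) (a b : Int) (h : a + 2 ≤ b) :
    handle_recursive a b arr =
      hrLS arr a b + hrRS arr a b
        + (b - a) * (PySem.List.slice arr (some a) (some (b + 1))).sum := by
  rw [handle_recursive]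
  rw [dif_neg (by omega), dif_neg (by omega)]
  rw [List.foldl_attach (f := fun ans i =>
    ans + handle_recursive a i arr + handle_recursive (i + 1) b arr
      + (PySem.List.slice arr (some a) (some (b + 1))).sum)]
  have hfe : (fun ans i =>
      ans + handle_recursive a i arr + handle_recursive (i + 1) b arr
        + (PySem.List.slice arr (some a) (some (b + 1))).sum)
      = (fun (ans : Int) (i : Int) =>
      ans + (handle_recursive a i arr + (handle_recursive (i + 1) b arr
        + (PySem.List.slice arr (some a) (some (b + 1))).sum))) := by
    funext ans i; ring
  rw [hfe, PySem.List.foldl_add, zero_add]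
  rw [PySem.List.sum_map_add_int]
  rw [PySem.List.sum_map_add_int]
  rw [PySem.List.sum_map_const_int]
  rw [PySem.List.length_pyRange_one]
  have hcast : (((b - a).toNat : Nat) : Int) = b - a := by omega
  rw [hcast]
  have hsh : (PySem.List.pyRange a b 1).map (fun i => handle_recursive (i + 1) b arr)
      = (PySem.List.pyRange (a + 1) (b + 1) 1).map (fun j => handle_recursive j b arr) :=
    map_shift (fun j => handle_recursive j b arr) a b
  rw [hsh]
  unfold hrLS hrRS
  ring

-- cell (start a, length d) of the three tables holds the recursive value and the two running sums
def hrCellOK (l r : Int) (arr : List Int) (M L R : List Int) (a d : Int) : Prop :=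
  PySem.List.pyGetD M (hrOff l r a d) 0 = handle_recursive a (a + d) arr ∧
  PySem.List.pyGetD L (hrOff l r a d) 0 = hrLS arr a (a + d) ∧
  PySem.List.pyGetD R (hrOff l r a d) 0 = hrRS arr a (a + d)

-- tables correct for every in-range cell of length < D
def hrInv (l r : Int) (arr : List Int) (M L R : List Int) (D : Int) : Prop :=
  M.length = ((r - l + 1) * (r - l + 1)).toNat ∧
  L.length = ((r - l + 1) * (r - l + 1)).toNat ∧
  R.length = ((r - l + 1) * (r - l + 1)).toNat ∧
  ∀ a d : Int, l ≤ a → 0 ≤ d → a + d ≤ r → d < D → hrCellOK l r arr M L R a d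

theorem hrOff_nonneg (l r a d : Int) (hlr : l < r) (ha : l ≤ a) (hd : 0 ≤ d) :
    0 ≤ hrOff l r a d := by
  unfold hrOff
  have := mul_nonneg (show (0:Int) ≤ a - l by omega) (show (0:Int) ≤ r - l + 1 by omega)
  omega

theorem hrOff_lt (l r a d : Int) (hlr : l < r) (_ha : l ≤ a) (hd : 0 ≤ d) (hadr : a + d ≤ r) :
    hrOff l r a d < (r - l + 1) * (r - l + 1) := by
  unfold hrOff
  have h1 : (a - l) * (r - l + 1) ≤ (r - l - d) * (r - l + 1) :=
    mul_le_mul_of_nonneg_right (by omega) (by omega)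
  nlinarith

theorem hrOff_inj (l r a d a' d' : Int) (hlr : l < r)
    (hd : 0 ≤ d) (hdW : d ≤ r - l) (hd' : 0 ≤ d') (hdW' : d' ≤ r - l)
    (heq : hrOff l r a d = hrOff l r a' d') : a = a' ∧ d = d' := by
  unfold hrOff at heq
  have h2 : (a - a') * (r - l + 1) = d' - d := by linear_combination heq
  rcases lt_trichotomy a a' with h | h | h
  · exfalso
    have : (a - a') * (r - l + 1) ≤ (-1) * (r - l + 1) :=
      mul_le_mul_of_nonneg_right (by omega) (by omega)
    omega
  · constructor
    · exact h
    · subst h; omega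
  · exfalso
    have : (1 : Int) * (r - l + 1) ≤ (a - a') * (r - l + 1) :=
      mul_le_mul_of_nonneg_right (by omega) (by omega)
    omega

-- pyGetD after pySetD, Int indices
theorem getD_setD (xs : List Int) (i j v : Int) (h0 : 0 ≤ i) (hl : i < (xs.length : Int))
    (h0j : 0 ≤ j) :
    PySem.List.pyGetD (PySem.List.pySetD xs i v) j 0
      = if j = i then v else PySem.List.pyGetD xs j 0 := by
  have hi : i = ((i.toNat : Nat) : Int) := by omega
  have hj : j = ((j.toNat : Nat) : Int) := by omega
  rw [hi, hj, PySem.List.pyGetD_pySetD_natCast _ _ _ _ _ (by omega)]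
  by_cases h : j.toNat = i.toNat
  · rw [if_pos h, if_pos (by omega)]
  · rw [if_neg h, if_neg (by omega)]

theorem getD_rep (m : Nat) (j : Int) :
    PySem.List.pyGetD (List.replicate m (0 : Int)) j 0 = 0 := by
  by_cases h : PySem.Raise.InRange (List.replicate m (0 : Int)).length j
  · exact List.eq_of_mem_replicate (PySem.List.pyGetD_mem _ _ h)
  · exact PySem.List.pyGetD_of_none _ _ _ ((PySem.List.pyGet?_eq_none_iff _ _).mpr h)

theorem seed_aux (l r : Int) (arr : List Int) (hlr : l < r) :
    ∀ m : Nat, (m : Int) ≤ r - l →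
      ((PySem.List.pyRange l (l + (m : Int)) 1).foldl
          (fun st a => (PySem.List.pySetD st.1 st.2
                          (PySem.List.pyGetD arr a 0 + PySem.List.pyGetD arr (a + 1) 0),
                        st.2 + (r - l + 1)))
          (List.replicate ((r - l + 1) * (r - l + 1)).toNat (0 : Int), 1)).1.length
            = ((r - l + 1) * (r - l + 1)).toNat ∧
      ((PySem.List.pyRange l (l + (m : Int)) 1).foldl
          (fun st a => (PySem.List.pySetD st.1 st.2
                          (PySem.List.pyGetD arr a 0 + PySem.List.pyGetD arr (a + 1) 0),
                        st.2 + (r - l + 1)))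
          (List.replicate ((r - l + 1) * (r - l + 1)).toNat (0 : Int), 1)).2
            = 1 + (m : Int) * (r - l + 1) ∧
      (∀ a : Int, l ≤ a → a < l + (m : Int) →
        PySem.List.pyGetD ((PySem.List.pyRange l (l + (m : Int)) 1).foldl
          (fun st a => (PySem.List.pySetD st.1 st.2
                          (PySem.List.pyGetD arr a 0 + PySem.List.pyGetD arr (a + 1) 0),
                        st.2 + (r - l + 1)))
          (List.replicate ((r - l + 1) * (r - l + 1)).toNat (0 : Int), 1)).1
            (1 + (a - l) * (r - l + 1)) 0
            = PySem.List.pyGetD arr a 0 + PySem.List.pyGetD arr (a + 1) 0) ∧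
      (∀ j : Int, 0 ≤ j → (∀ a : Int, l ≤ a → a < l + (m : Int) → j ≠ 1 + (a - l) * (r - l + 1)) →
        PySem.List.pyGetD ((PySem.List.pyRange l (l + (m : Int)) 1).foldl
          (fun st a => (PySem.List.pySetD st.1 st.2
                          (PySem.List.pyGetD arr a 0 + PySem.List.pyGetD arr (a + 1) 0),
                        st.2 + (r - l + 1)))
          (List.replicate ((r - l + 1) * (r - l + 1)).toNat (0 : Int), 1)).1 j 0 = 0) := by
  have hW2 : (0 : Int) ≤ (r - l + 1) * (r - l + 1) :=
    mul_nonneg (by omega) (by omega)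
  intro m
  induction m with
  | zero =>
    intro _
    rw [show l + ((0 : Nat) : Int) = l by norm_num]
    rw [PySem.List.pyRange_one_eq_nil le_rfl]
    refine ⟨by simp, by simp, ?_, ?_⟩
    · intro a ha0 ha; omega
    · intro j _ _; exact getD_rep _ j
  | succ m ih =>
    intro hm
    have hcast : ((m + 1 : Nat) : Int) = (m : Int) + 1 := by push_cast; ring
    rw [hcast, show l + ((m : Int) + 1) = (l + (m : Int)) + 1 by ring,
        PySem.List.pyRange_one_succ_right (by omega), List.foldl_append]
    obtain ⟨ihL, ihI, ihK, ihZ⟩ := ih (by omega)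
    simp only [List.foldl_cons, List.foldl_nil]
    set G := (PySem.List.pyRange l (l + (m : Int)) 1).foldl
      (fun st a => (PySem.List.pySetD st.1 st.2
                      (PySem.List.pyGetD arr a 0 + PySem.List.pyGetD arr (a + 1) 0),
                    st.2 + (r - l + 1)))
      (List.replicate ((r - l + 1) * (r - l + 1)).toNat (0 : Int), 1) with hG
    have hmul : (m : Int) * (r - l + 1) ≤ (r - l - 1) * (r - l + 1) :=
      mul_le_mul_of_nonneg_right (by omega) (by omega)
    have hmul0 : (0 : Int) ≤ (m : Int) * (r - l + 1) :=
      mul_nonneg (by omega) (by omega)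
    have hilt : 1 + (m : Int) * (r - l + 1) < (r - l + 1) * (r - l + 1) := by nlinarith
    have hlen : ((G.1.length : Nat) : Int) = (r - l + 1) * (r - l + 1) := by
      rw [ihL]; omega
    refine ⟨?_, ?_, ?_, ?_⟩
    · rw [PySem.List.length_pySetD]; exact ihL
    · rw [ihI]; ring
    · intro a ha0 ha
      rw [ihI, getD_setD _ _ _ _ (by omega) (by rw [hlen]; exact hilt) ?_]
      · by_cases ham : a = l + (m : Int)
        · rw [if_pos (by rw [ham]; ring_nf), ham]
        · have hklt : (a - l) * (r - l + 1) < (m : Int) * (r - l + 1) :=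
            mul_lt_mul_of_pos_right (by omega) (by omega)
          rw [if_neg (by omega)]
          exact ihK a ha0 (by omega)
      · have : (0 : Int) ≤ (a - l) * (r - l + 1) := mul_nonneg (by omega) (by omega)
        omega
    · intro j hj0 hj
      rw [ihI, getD_setD _ _ _ _ (by omega) (by rw [hlen]; exact hilt) hj0]
      rw [if_neg (by
        have := hj (l + (m : Int)) (by omega) (by omega)
        intro hcon; apply this; rw [hcon]; ring_nf)]
      exact ihZ j hj0 (fun a ha0 ha => hj a ha0 (by omega))

-- after seeding: all cells of length 0 and 1 are correct
theorem init_inv (l r : Int) (arr : List Int) (hlr : l < r) :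
    hrInv l r arr
      (hrSeed l r arr (List.replicate ((r - l + 1) * (r - l + 1)).toNat 0)).1
      (List.replicate ((r - l + 1) * (r - l + 1)).toNat 0)
      (List.replicate ((r - l + 1) * (r - l + 1)).toNat 0) 2 := by
  have hcast : (((r - l).toNat : Nat) : Int) = r - l := by omega
  have hseed := seed_aux l r arr hlr (r - l).toNat (by omega)
  rw [hcast, show l + (r - l) = r by ring] at hseed
  obtain ⟨hL, _, hK, hZ⟩ := hseed
  unfold hrSeed
  refine ⟨hL, by simp, by simp, ?_⟩
  intro a d ha hd0 hadr hd2
  have hWpos : (0 : Int) < r - l + 1 := by omega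
  interval_cases d
  · refine ⟨?_, ?_, ?_⟩
    · have hoff : hrOff l r a 0 = (a - l) * (r - l + 1) := by unfold hrOff; ring
      rw [hoff, hZ ((a - l) * (r - l + 1))
          (mul_nonneg (by omega) (by omega)) ?_]
      · rw [h_stop arr a (a + 0) (by omega)]
      · intro a' ha' ha'r hne
        have h1 : (a - a') * (r - l + 1) = 1 := by linear_combination hne
        rcases le_or_gt (a - a') 0 with hc | hc
        · have : (a - a') * (r - l + 1) ≤ 0 * (r - l + 1) :=
            mul_le_mul_of_nonneg_right (by omega) (by omega)
          omega
        · have : 1 * (r - l + 1) ≤ (a - a') * (r - l + 1) :=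
            mul_le_mul_of_nonneg_right (by omega) (by omega)
          omega
    · rw [show a + 0 = a by ring, getD_rep, hrLS_nil]
    · rw [show a + 0 = a by ring, getD_rep, hrRS_nil]
  · refine ⟨?_, ?_, ?_⟩
    · have hoff : hrOff l r a 1 = 1 + (a - l) * (r - l + 1) := by unfold hrOff; ring
      rw [hoff, hK a (by omega) (by omega)]
      exact (h_base arr a).symm
    · rw [getD_rep, hrLS_one]
    · rw [getD_rep, hrRS_one]

-- the inner loop, cell by cell: counter position, preserved invariant, new cells of length d
theorem inner_aux (l r : Int) (arr : List Int) (d : Int) (hlr : l < r) (hd2 : 2 ≤ d)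
    (hdW : d ≤ r - l) :
    ∀ (m : Nat) (st : List Int × List Int × List Int),
      l + (m : Int) ≤ r - d + 1 →
      hrInv l r arr st.1 st.2.1 st.2.2 d →
      (let F := (PySem.List.pyRange l (l + (m : Int)) 1).foldl (hrBody l r arr d) (st, d)
       F.2 = d + (m : Int) * (r - l + 1) ∧
       hrInv l r arr F.1.1 F.1.2.1 F.1.2.2 d ∧
       (∀ a : Int, l ≤ a → a < l + (m : Int) → hrCellOK l r arr F.1.1 F.1.2.1 F.1.2.2 a d)) := by
  intro m
  induction m with
  | zero =>
    intro st _ hInv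
    rw [show l + ((0 : Nat) : Int) = l by norm_num]
    rw [PySem.List.pyRange_one_eq_nil (by omega)]
    exact ⟨by simp, hInv, fun a ha hlt => absurd hlt (by omega)⟩
  | succ m ih =>
    intro st hm hInv
    have hcast : ((m + 1 : Nat) : Int) = (m : Int) + 1 := by push_cast; ring
    rw [hcast, show l + ((m : Int) + 1) = (l + (m : Int)) + 1 by ring,
        PySem.List.pyRange_one_succ_right (by omega), List.foldl_append]
    obtain ⟨ihI, ihInv, ihCell⟩ := ih st (by omega) hInv
    set G := (PySem.List.pyRange l (l + (m : Int)) 1).foldl (hrBody l r arr d) (st, d)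
      with hGdef
    obtain ⟨hML, hLL, hRL, hCells⟩ := ihInv
    set a := l + (m : Int) with hadef
    have haR : a + d ≤ r := by omega
    have hWpos : (0 : Int) < r - l + 1 := by omega
    have hoff : hrOff l r a d = d + (m : Int) * (r - l + 1) := by unfold hrOff; ring
    have hoffL : hrOff l r a (d - 1) = d + (m : Int) * (r - l + 1) - 1 := by unfold hrOff; ring
    have hoffR : hrOff l r (a + 1) (d - 1) = d + (m : Int) * (r - l + 1) + (r - l + 1) - 1 := by
      unfold hrOff; ring
    have hlenM : ((G.1.1.length : Nat) : Int) = (r - l + 1) * (r - l + 1) := by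
      rw [hML]
      have := mul_nonneg (show (0:Int) ≤ r - l + 1 by omega) (show (0:Int) ≤ r - l + 1 by omega)
      omega
    have hlenL : ((G.1.2.1.length : Nat) : Int) = (r - l + 1) * (r - l + 1) := by
      rw [hLL]
      have := mul_nonneg (show (0:Int) ≤ r - l + 1 by omega) (show (0:Int) ≤ r - l + 1 by omega)
      omega
    have hlenR : ((G.1.2.2.length : Nat) : Int) = (r - l + 1) * (r - l + 1) := by
      rw [hRL]
      have := mul_nonneg (show (0:Int) ≤ r - l + 1 by omega) (show (0:Int) ≤ r - l + 1 by omega)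
      omega
    have hi0 : 0 ≤ hrOff l r a d := hrOff_nonneg l r a d hlr (by omega) (by omega)
    have hilt : hrOff l r a d < (r - l + 1) * (r - l + 1) :=
      hrOff_lt l r a d hlr (by omega) (by omega) haR
    have hcellL := hCells a (d - 1) (by omega) (by omega) (by omega) (by omega)
    have hcellR := hCells (a + 1) (d - 1) (by omega) (by omega) (by omega) (by omega)
    obtain ⟨hLm, hLl, _⟩ := hcellL
    obtain ⟨hRm, _, hRr⟩ := hcellR
    have hlv : PySem.List.pyGetD G.1.2.1 (G.2 - 1) 0 + PySem.List.pyGetD G.1.1 (G.2 - 1) 0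
        = hrLS arr a (a + d) := by
      rw [ihI, ← hoffL, hLl, hLm]
      have := hrLS_succ arr a (a + (d - 1)) (by omega)
      rw [show a + (d - 1) + 1 = a + d by ring] at this
      rw [this]
    have hrv : PySem.List.pyGetD G.1.2.2 (G.2 + (r - l + 1) - 1) 0
          + PySem.List.pyGetD G.1.1 (G.2 + (r - l + 1) - 1) 0
        = hrRS arr a (a + d) := by
      rw [ihI, ← hoffR, hRr, hRm]
      rw [show a + 1 + (d - 1) = a + d by ring]
      rw [hrRS_cons arr a (a + d) (by omega)]
      ring
    simp only [List.foldl_cons, List.foldl_nil]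
    rw [hrBody]
    simp only [hlv, hrv]
    rw [ihI]
    have hval : hrLS arr a (a + d) + hrRS arr a (a + d)
        + d * (PySem.List.slice arr (some a) (some (a + d + 1))).sum
        = handle_recursive a (a + d) arr := by
      rw [h_split arr a (a + d) (by omega)]
      rw [show a + d - a = d by ring]
    refine ⟨?_, ⟨?_, ?_, ?_, ?_⟩, ?_⟩
    · show d + (m : Int) * (r - l + 1) + (r - l + 1) = d + ((m : Int) + 1) * (r - l + 1)
      ring
    · show (PySem.List.pySetD G.1.1 (d + (m : Int) * (r - l + 1)) _).length = _
      rw [PySem.List.length_pySetD]; exact hML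
    · show (PySem.List.pySetD G.1.2.1 (d + (m : Int) * (r - l + 1)) _).length = _
      rw [PySem.List.length_pySetD]; exact hLL
    · show (PySem.List.pySetD G.1.2.2 (d + (m : Int) * (r - l + 1)) _).length = _
      rw [PySem.List.length_pySetD]; exact hRL
    · intro a' d' ha' hd0' hadr' hlt'
      have hne : hrOff l r a' d' ≠ d + (m : Int) * (r - l + 1) := by
        rw [← hoff]
        intro hcon
        have := hrOff_inj l r a' d' a d hlr hd0' (by omega) (by omega) (by omega) hcon
        omega
      have hj0 : 0 ≤ hrOff l r a' d' := hrOff_nonneg l r a' d' hlr ha' hd0'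
      obtain ⟨c1, c2, c3⟩ := hCells a' d' ha' hd0' hadr' hlt'
      refine ⟨?_, ?_, ?_⟩
      · show PySem.List.pyGetD (PySem.List.pySetD G.1.1 (d + (m : Int) * (r - l + 1)) _) _ 0 = _
        rw [getD_setD _ _ _ _ (by omega) (by rw [hlenM]; exact hoff ▸ hilt) hj0, if_neg hne]
        exact c1
      · show PySem.List.pyGetD (PySem.List.pySetD G.1.2.1 (d + (m : Int) * (r - l + 1)) _) _ 0 = _
        rw [getD_setD _ _ _ _ (by omega) (by rw [hlenL]; exact hoff ▸ hilt) hj0, if_neg hne]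
        exact c2
      · show PySem.List.pyGetD (PySem.List.pySetD G.1.2.2 (d + (m : Int) * (r - l + 1)) _) _ 0 = _
        rw [getD_setD _ _ _ _ (by omega) (by rw [hlenR]; exact hoff ▸ hilt) hj0, if_neg hne]
        exact c3
    · intro a'' ha'' hlt''
      have hj0 : 0 ≤ hrOff l r a'' d := hrOff_nonneg l r a'' d hlr ha'' (by omega)
      by_cases haa : a'' = a
      · subst haa
        refine ⟨?_, ?_, ?_⟩
        · show PySem.List.pyGetD (PySem.List.pySetD G.1.1 (d + (m : Int) * (r - l + 1)) _) _ 0 = _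
          rw [getD_setD _ _ _ _ (by omega) (by rw [hlenM]; exact hoff ▸ hilt) hj0,
              if_pos hoff, ← hval]
        · show PySem.List.pyGetD (PySem.List.pySetD G.1.2.1 (d + (m : Int) * (r - l + 1)) _) _ 0 = _
          rw [getD_setD _ _ _ _ (by omega) (by rw [hlenL]; exact hoff ▸ hilt) hj0, if_pos hoff]
        · show PySem.List.pyGetD (PySem.List.pySetD G.1.2.2 (d + (m : Int) * (r - l + 1)) _) _ 0 = _
          rw [getD_setD _ _ _ _ (by omega) (by rw [hlenR]; exact hoff ▸ hilt) hj0, if_pos hoff]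
      · have hne : hrOff l r a'' d ≠ d + (m : Int) * (r - l + 1) := by
          rw [← hoff]
          intro hcon
          have := hrOff_inj l r a'' d a d hlr (by omega) (by omega) (by omega) (by omega) hcon
          omega
        obtain ⟨c1, c2, c3⟩ := ihCell a'' ha'' (by omega)
        refine ⟨?_, ?_, ?_⟩
        · show PySem.List.pyGetD (PySem.List.pySetD G.1.1 (d + (m : Int) * (r - l + 1)) _) _ 0 = _
          rw [getD_setD _ _ _ _ (by omega) (by rw [hlenM]; exact hoff ▸ hilt) hj0, if_neg hne]
          exact c1
        · show PySem.List.pyGetD (PySem.List.pySetD G.1.2.1 (d + (m : Int) * (r - l + 1)) _) _ 0 = _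
          rw [getD_setD _ _ _ _ (by omega) (by rw [hlenL]; exact hoff ▸ hilt) hj0, if_neg hne]
          exact c2
        · show PySem.List.pyGetD (PySem.List.pySetD G.1.2.2 (d + (m : Int) * (r - l + 1)) _) _ 0 = _
          rw [getD_setD _ _ _ _ (by omega) (by rw [hlenR]; exact hoff ▸ hilt) hj0, if_neg hne]
          exact c3

-- one whole inner pass bumps the invariant from d to d+1
theorem hrInner_spec (l r : Int) (arr : List Int) (d : Int) (hlr : l < r) (hd2 : 2 ≤ d)
    (hdW : d ≤ r - l) (st : List Int × List Int × List Int)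
    (hInv : hrInv l r arr st.1 st.2.1 st.2.2 d) :
    hrInv l r arr
      (hrInner l r arr d st).1 (hrInner l r arr d st).2.1 (hrInner l r arr d st).2.2
      (d + 1) := by
  have hcast : (((r - d + 1 - l).toNat : Nat) : Int) = r - d + 1 - l := by omega
  have hmain := inner_aux l r arr d hlr hd2 hdW (r - d + 1 - l).toNat st
    (by omega) hInv
  rw [hcast] at hmain
  rw [show l + (r - d + 1 - l) = r - d + 1 by ring] at hmain
  obtain ⟨_, ⟨hML, hLL, hRL, hCells⟩, hNew⟩ := hmain
  unfold hrInner
  refine ⟨hML, hLL, hRL, ?_⟩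
  intro a e ha he0 har helt
  by_cases hed : e = d
  · subst hed
    exact hNew a ha (by omega)
  · exact hCells a e ha he0 har (by omega)

-- the outer loop establishes the invariant for every length below its counter
theorem build_aux (l r : Int) (arr : List Int) (hlr : l < r) :
    ∀ m : Nat, (m : Int) ≤ r - l - 1 →
      ∀ st : List Int × List Int × List Int,
        hrInv l r arr st.1 st.2.1 st.2.2 2 →
        (let F := (PySem.List.pyRange 2 (2 + (m : Int)) 1).foldl
          (fun st d => hrInner l r arr d st) st
         hrInv l r arr F.1 F.2.1 F.2.2 (2 + (m : Int))) := by
  intro m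
  induction m with
  | zero =>
    intro _ st hInv
    rw [show (2 : Int) + ((0 : Nat) : Int) = 2 by norm_num]
    rw [PySem.List.pyRange_one_eq_nil (by omega)]
    exact hInv
  | succ m ih =>
    intro hm st hInv
    have hcast : ((m + 1 : Nat) : Int) = (m : Int) + 1 := by push_cast; ring
    rw [hcast, show (2 : Int) + ((m : Int) + 1) = (2 + (m : Int)) + 1 by ring,
        PySem.List.pyRange_one_succ_right (by omega), List.foldl_append]
    have hprev := ih (by omega) st hInv
    simp only [List.foldl_cons, List.foldl_nil]
    have := hrInner_spec l r arr (2 + (m : Int)) hlr (by omega) (by omega) _ hprev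
    rw [show 2 + (m : Int) + 1 = (2 + (m : Int)) + 1 by ring] at this
    exact this

theorem main_eq (l r : Int) (arr : List Int) (h : l < r) :
    handle_recursive_alt l r arr = handle_recursive l r arr := by
  unfold handle_recursive_alt
  rw [if_neg (by omega)]
  have hinit := init_inv l r arr h
  have hcast : (((r - l - 1).toNat : Nat) : Int) = r - l - 1 := by omega
  have hbuild := build_aux l r arr h (r - l - 1).toNat (by omega)
    ((hrSeed l r arr (List.replicate ((r - l + 1) * (r - l + 1)).toNat 0)).1,
      List.replicate ((r - l + 1) * (r - l + 1)).toNat 0,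
      List.replicate ((r - l + 1) * (r - l + 1)).toNat 0) hinit
  rw [hcast] at hbuild
  rw [show (2 : Int) + (r - l - 1) = r - l + 1 by ring] at hbuild
  unfold hrBuild
  obtain ⟨_, _, _, hCells⟩ := hbuild
  have hcell := hCells l (r - l) (le_refl l) (by omega) (by omega) (by omega)
  obtain ⟨hM, _, _⟩ := hcell
  rw [show l + (r - l) = r by ring] at hM
  rw [show hrOff l r l (r - l) = r - l by unfold hrOff; ring] at hM
  exact hM

-- ===== VERDICT (by name: the statement is the Claim_ definition above) =====
theorem handle_recursive_spec : Claim_equal_handle_recursive := by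
  intro l r arr _ _
  unfold Spec_handle_recursive
  by_cases h : l ≥ r
  · rw [handle_recursive, handle_recursive_alt]
    simp [h]
  · exact (main_eq l r arr (by omega)).symm
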